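-- pv_equiv track=rewrite | github.com/JakubKwiat/Scrabble-with-AI | Scrabble.py | usunNieSlowa
-- ===== SOURCE A (Python) =====
-- def usunNieSlowa(plansza):
--     czescSlowa = [[0, 0, 0, 0, 0, 0, 0],
--                   [0, 0, 0, 0, 0, 0, 0],
--                   [0, 0, 0, 0, 0, 0, 0],
--                   [0, 0, 0, 0, 0, 0, 0],
--                   [0, 0, 0, 0, 0, 0, 0],
--                   [0, 0, 0, 0, 0, 0, 0],
--                   [0, 0, 0, 0, 0, 0, 0], ]  # plansza pusta 7x7
--     planszatest = [['-' for x in range(len(plansza) + 1)] for y in range(len(plansza) + 1)]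
--     for i in range(0, len(plansza)):
--         for j in range(0, len(plansza)):
--             planszatest[i][j] = plansza[i][j]
--
--     for i in range(0, len(plansza)):
--         for j in range(0, len(plansza)):
--             if planszatest[i][j] != '-':
--                 if planszatest[i + 1][j] != '-' and planszatest[i - 1][j] == '-':
--                     sprawdzane = ''
--                     o = i
--                     while planszatest[o][j] != '-' and o < len(plansza):
--                         czescSlowa[o][j] = 1
--                         o = o + 1
--
--                 if planszatest[i][j + 1] != '-' and planszatest[i][j - 1] == '-':
--                     sprawdzane = ''
--                     o = j
--                     while planszatest[i][o] != '-' and o < len(plansza):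
--                         czescSlowa[i][o] = 1
--                         o = o + 1
--     planszaCP=plansza.copy()
--     for i in range(0, len(plansza)):
--         for j in range(0, len(plansza)):
--             if czescSlowa[i][j] == 0:
--                 planszaCP[i][j] = '-'
--     return planszaCP
-- ===== SOURCE B (Python) =====
-- def usunNieSlowa(plansza):
--     # Single orthogonal-neighbor test instead of word-start detection + run traversal.
--     # Like A, returns a shallow copy: the input's rows are blanked in place.
--     n = len(plansza)
--
--     def filled(i, j):
--         return 0 <= i < n and 0 <= j < n and plansza[i][j] != '-'
--
--     keep = [[filled(i, j) and (filled(i + 1, j) or filled(i - 1, j) or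
--                                filled(i, j + 1) or filled(i, j - 1))
--              for j in range(n)] for i in range(n)]
--     planszaCP = plansza.copy()
--     for i in range(n):
--         for j in range(n):
--             if not keep[i][j]:
--                 planszaCP[i][j] = '-'
--     return planszaCP
-- ===== Notes on version B (the rewrite author's own statement) =====
-- stated objective: simpler
-- what changed: Replaces A's word-start detection plus run-traversal while-loops over a padded scratch board with a single per-cell orthogonal-neighbor test that builds a boolean keep-mask in one comprehension.
-- crash fix: On boards larger than 7x7 whose rows are at least board-height long, A raises IndexError on its hardcoded 7x7 czescSlowa mark grid while B returns the correctly blanked board. — e.g. on usunNieSlowa([["A", "A", "-", "-", "-", "-", "-", "-"], ["-", "-", "-", "-", "-", "-", "-", "-"], ["-", "-", "-", "-", "-", "-", "-"…): A raises IndexError, B returns [["A", "A", "-", "-", "-", "-", "-", "-"], ["-", "-", "-", "-", "-", "-", "-", "-"], ["-", "-", "-", "-", "-", "-", "-"…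
import Mathlib
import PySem

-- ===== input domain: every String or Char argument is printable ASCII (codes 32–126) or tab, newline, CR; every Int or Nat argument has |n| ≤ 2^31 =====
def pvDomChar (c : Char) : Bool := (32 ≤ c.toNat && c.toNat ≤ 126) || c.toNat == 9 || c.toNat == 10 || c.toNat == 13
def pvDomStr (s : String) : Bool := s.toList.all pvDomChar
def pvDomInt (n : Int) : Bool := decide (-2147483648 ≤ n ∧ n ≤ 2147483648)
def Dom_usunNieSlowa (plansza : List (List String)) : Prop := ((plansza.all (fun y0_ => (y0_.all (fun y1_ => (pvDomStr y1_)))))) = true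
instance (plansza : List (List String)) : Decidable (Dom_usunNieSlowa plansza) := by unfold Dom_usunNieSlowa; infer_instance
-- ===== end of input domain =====

-- B replaces A's word-start detection + run-traversal marking by a per-cell orthogonal-neighbor
-- test (simpler); like A it returns a shallow copy, i.e. in Python the input's rows are blanked
-- in place — the equivalence proved here is about the return value.

-- ===== PORT A =====

-- g[i][j] read with Python index semantics; default "" / 0 is never reached on admitted inputs
def pvGet2D {α : Type} (g : List (List α)) (i j : Int) (d : α) : α :=
  PySem.List.pyGetD ((PySem.List.pyGet? g i).getD []) j d

-- g[i][j] = v with Python index semantics (indices are in range on admitted inputs)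
def pvSet2 {α : Type} (g : List (List α)) (i j : Int) (v : α) : List (List α) :=
  PySem.List.pySetD g i (PySem.List.pySetD ((PySem.List.pyGet? g i).getD []) j v)

-- the hardcoded 7x7 zero grid of A ("plansza pusta 7x7")
def pvCzInit : List (List Int) :=
  [[0, 0, 0, 0, 0, 0, 0], [0, 0, 0, 0, 0, 0, 0], [0, 0, 0, 0, 0, 0, 0], [0, 0, 0, 0, 0, 0, 0],
   [0, 0, 0, 0, 0, 0, 0], [0, 0, 0, 0, 0, 0, 0], [0, 0, 0, 0, 0, 0, 0]]

-- planszatest: the (len+1) x (len+1) '-'-padded scratch board, then the copy-in loops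
def pvPlanszatest (plansza : List (List String)) : List (List String) :=
  let n : Int := PySem.List.len plansza
  let pt : List (List String) :=
    (PySem.List.pyRange 0 (n + 1) 1).map (fun _ => (PySem.List.pyRange 0 (n + 1) 1).map (fun _ => "-"))
  (PySem.List.pyRange 0 n 1).foldl (fun pt i =>
    (PySem.List.pyRange 0 n 1).foldl (fun pt j =>
      pvSet2 pt i j (pvGet2D plansza i j "")) pt) pt

-- the vertical while loop:  while planszatest[o][j] != '-' and o < len: czescSlowa[o][j] = 1; o += 1
-- (fuel: the loop increments o and provably stops by o = len, so len+1 steps always suffice)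
def pvMarkV (pt : List (List String)) (n j : Int) : Nat → Int → List (List Int) → List (List Int)
  | 0, _, cz => cz
  | fuel + 1, o, cz =>
    if pvGet2D pt o j "" ≠ "-" ∧ o < n then
      pvMarkV pt n j fuel (o + 1) (pvSet2 cz o j 1)
    else cz

-- the horizontal while loop
def pvMarkH (pt : List (List String)) (n i : Int) : Nat → Int → List (List Int) → List (List Int)
  | 0, _, cz => cz
  | fuel + 1, o, cz =>
    if pvGet2D pt i o "" ≠ "-" ∧ o < n then
      pvMarkH pt n i fuel (o + 1) (pvSet2 cz i o 1)
    else cz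

-- czescSlowa after A's double marking loop
def pvCzGrid (plansza : List (List String)) : List (List Int) :=
  let n : Int := PySem.List.len plansza
  let pt := pvPlanszatest plansza
  (PySem.List.pyRange 0 n 1).foldl (fun cz i =>
    (PySem.List.pyRange 0 n 1).foldl (fun cz j =>
      if pvGet2D pt i j "" ≠ "-" then
        let cz := if pvGet2D pt (i + 1) j "" ≠ "-" ∧ pvGet2D pt (i - 1) j "" = "-" then
            pvMarkV pt n j (n.toNat + 1) i cz else cz
        if pvGet2D pt i (j + 1) "" ≠ "-" ∧ pvGet2D pt i (j - 1) "" = "-" then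
            pvMarkH pt n i (n.toNat + 1) j cz else cz
      else cz) cz) pvCzInit

def usunNieSlowa (plansza : List (List String)) : List (List String) :=
  let n : Int := PySem.List.len plansza
  let cz := pvCzGrid plansza
  (PySem.List.pyRange 0 n 1).foldl (fun p i =>
    (PySem.List.pyRange 0 n 1).foldl (fun p j =>
      if pvGet2D cz i j 0 == 0 then pvSet2 p i j "-" else p) p) plansza

-- ===== PORT B =====

-- filled(i, j): 0 <= i < n and 0 <= j < n and plansza[i][j] != '-'
def pvFilled (plansza : List (List String)) (n i j : Int) : Bool :=
  decide (0 ≤ i ∧ i < n ∧ 0 ≤ j ∧ j < n) && decide (pvGet2D plansza i j "" ≠ "-")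

-- keep: the boolean mask of cells having a filled orthogonal neighbor
def pvKeep (plansza : List (List String)) : List (List Bool) :=
  let n : Int := PySem.List.len plansza
  (PySem.List.pyRange 0 n 1).map (fun i => (PySem.List.pyRange 0 n 1).map (fun j =>
    pvFilled plansza n i j && (pvFilled plansza n (i + 1) j || pvFilled plansza n (i - 1) j ||
      pvFilled plansza n i (j + 1) || pvFilled plansza n i (j - 1))))

def usunNieSlowa_alt (plansza : List (List String)) : List (List String) :=
  let n : Int := PySem.List.len plansza
  let keep := pvKeep plansza
  (PySem.List.pyRange 0 n 1).foldl (fun p i =>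
    (PySem.List.pyRange 0 n 1).foldl (fun p j =>
      if !(pvGet2D keep i j true) then pvSet2 p i j "-" else p) p) plansza

-- ===== PRECONDITION & SPEC =====

-- Pre_ is exactly where the Python A returns: a board larger than 7 overruns the hardcoded
-- 7x7 czescSlowa grid (IndexError), and a row shorter than the board height overruns in the
-- copy-in loop (IndexError).
def Pre_usunNieSlowa (plansza : List (List String)) : Prop :=
  plansza.length ≤ 7 ∧ ∀ row ∈ plansza, plansza.length ≤ row.length

instance (plansza : List (List String)) : Decidable (Pre_usunNieSlowa plansza) := by
  unfold Pre_usunNieSlowa; infer_instance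

def pvWitness_usunNieSlowa : List (List String) := [["A", "-"], ["A", "A"]]

-- On boards larger than 7x7 (rows at least board-height long) A raises IndexError on its
-- hardcoded 7x7 mark grid while B returns the correctly blanked board.
def Raises_usunNieSlowa (plansza : List (List String)) : Prop :=
  7 < plansza.length ∧ ∀ row ∈ plansza, plansza.length ≤ row.length

instance (plansza : List (List String)) : Decidable (Raises_usunNieSlowa plansza) := by
  unfold Raises_usunNieSlowa; infer_instance

def pvRaiseWitness_usunNieSlowa : List (List String) :=
  [["A", "A", "-", "-", "-", "-", "-", "-"], ["-", "-", "-", "-", "-", "-", "-", "-"],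
   ["-", "-", "-", "-", "-", "-", "-", "B"], ["-", "-", "-", "-", "-", "-", "-", "-"],
   ["-", "-", "-", "-", "-", "-", "-", "-"], ["-", "-", "-", "-", "-", "-", "-", "-"],
   ["-", "-", "-", "-", "-", "-", "-", "-"], ["-", "-", "-", "-", "-", "-", "-", "-"]]

def pvRaiseWitnessOut_usunNieSlowa : List (List String) :=
  [["A", "A", "-", "-", "-", "-", "-", "-"], ["-", "-", "-", "-", "-", "-", "-", "-"],
   ["-", "-", "-", "-", "-", "-", "-", "-"], ["-", "-", "-", "-", "-", "-", "-", "-"],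
   ["-", "-", "-", "-", "-", "-", "-", "-"], ["-", "-", "-", "-", "-", "-", "-", "-"],
   ["-", "-", "-", "-", "-", "-", "-", "-"], ["-", "-", "-", "-", "-", "-", "-", "-"]]

def Spec_usunNieSlowa (plansza : List (List String)) (out : List (List String)) : Prop :=
  out = usunNieSlowa_alt plansza
instance (plansza : List (List String)) (out : List (List String)) : Decidable (Spec_usunNieSlowa plansza out) := by
  unfold Spec_usunNieSlowa; infer_instance

-- ===== CLAIM (what is proved, stated in full; the proofs are below) =====
def Claim_equal_usunNieSlowa : Prop := ∀ (plansza : List (List String)), Dom_usunNieSlowa plansza → Pre_usunNieSlowa plansza → Spec_usunNieSlowa plansza (usunNieSlowa plansza)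

def Claim_raises_usunNieSlowa : Prop :=
  (∀ (plansza : List (List String)), Dom_usunNieSlowa plansza → Raises_usunNieSlowa plansza → ¬ Pre_usunNieSlowa plansza) ∧
  (Dom_usunNieSlowa (pvRaiseWitness_usunNieSlowa) ∧ Raises_usunNieSlowa (pvRaiseWitness_usunNieSlowa) ∧
   usunNieSlowa_alt (pvRaiseWitness_usunNieSlowa) = pvRaiseWitnessOut_usunNieSlowa)

-- ===== LEMMAS AND PROOFS =====

-- proof-layer abbreviations (used only below)
def pvG2 {α : Type} (g : List (List α)) (a b : Nat) (d : α) : α := (g.getD a []).getD b d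
def pvShape {α : Type} (g : List (List α)) (r c : Nat) : Prop := g.length = r ∧ ∀ row ∈ g, row.length = c
def pvF (p : List (List String)) (i j : Int) : Bool := pvFilled p (↑p.length) i j
def pvRun (g : Int → Bool) (o a : Int) : Bool := (PySem.List.pyRange o (a + 1) 1).all g
-- the cells A's vertical / horizontal triggers mark
def pvPV (p : List (List String)) (a b i0 j0 : Int) : Bool :=
  decide (b = j0) && pvF p i0 j0 && pvF p (i0 + 1) j0 && !pvF p (i0 - 1) j0 &&
  decide (i0 ≤ a) && pvRun (fun x => pvF p x j0) i0 a
def pvPH (p : List (List String)) (a b i0 j0 : Int) : Bool :=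
  decide (a = i0) && pvF p i0 j0 && pvF p i0 (j0 + 1) && !pvF p i0 (j0 - 1) &&
  decide (j0 ≤ b) && pvRun (fun x => pvF p i0 x) j0 b

lemma pvGet2D_nonneg {α : Type} (g : List (List α)) {i j : Int} (hi : 0 ≤ i) (hj : 0 ≤ j) (d : α) :
    pvGet2D g i j d = pvG2 g i.toNat j.toNat d := by
  show (PySem.List.pyGet? ((PySem.List.pyGet? g i).getD []) j).getD d = _
  rw [PySem.List.pyGet?_of_nonneg _ hi, PySem.List.pyGet?_of_nonneg _ hj]
  simp [pvG2, List.getD_eq_getElem?_getD]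

lemma pvSet2_nonneg {α : Type} (g : List (List α)) {i j : Int} (hi : 0 ≤ i) (hj : 0 ≤ j) (v : α) :
    pvSet2 g i j v = g.set i.toNat ((g.getD i.toNat []).set j.toNat v) := by
  show PySem.List.pySetD g i (PySem.List.pySetD ((PySem.List.pyGet? g i).getD []) j v) = _
  rw [PySem.List.pySetD_of_nonneg _ _ hi, PySem.List.pySetD_of_nonneg _ _ hj,
    PySem.List.pyGet?_of_nonneg _ hi]
  simp [List.getD_eq_getElem?_getD]

lemma pvShape_set {α : Type} {g : List (List α)} {r c : Nat} (h : pvShape g r c) {a : Nat}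
    (ha : a < r) (b : Nat) (v : α) :
    pvShape (g.set a ((g.getD a []).set b v)) r c := by
  obtain ⟨hl, hr⟩ := h
  refine ⟨by simp [hl], ?_⟩
  intro row hrow
  rcases List.mem_or_eq_of_mem_set hrow with hmem | heq
  · exact hr row hmem
  · subst heq
    rw [List.length_set, List.getD_eq_getElem g [] (by omega)]
    exact hr _ (List.getElem_mem _)

lemma pvG2_set {α : Type} {g : List (List α)} {r c : Nat} (h : pvShape g r c) {a b : Nat}
    (ha : a < r) (hb : b < c) (v : α) (x y : Nat) (d : α) :
    pvG2 (g.set a ((g.getD a []).set b v)) x y d = if x = a ∧ y = b then v else pvG2 g x y d := by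
  obtain ⟨hl, hr⟩ := h
  have hrowlen : (g.getD a []).length = c := by
    rw [List.getD_eq_getElem g [] (by omega)]; exact hr _ (List.getElem_mem _)
  have houter : (g.set a ((g.getD a []).set b v)).getD x [] =
      if x = a then (g.getD a []).set b v else g.getD x [] := by
    rw [List.getD_eq_getElem?_getD, List.getElem?_set]
    by_cases hxa : a = x
    · rw [if_pos hxa, if_pos (by omega : a < g.length), if_pos hxa.symm, Option.getD_some]
    · rw [if_neg hxa, if_neg (fun hc => hxa hc.symm), ← List.getD_eq_getElem?_getD]
  unfold pvG2
  rw [houter]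
  by_cases hxa : x = a
  · rw [if_pos hxa, List.getD_eq_getElem?_getD, List.getElem?_set]
    by_cases hyb : b = y
    · rw [if_pos hyb, if_pos (by omega : b < (g.getD a []).length), Option.getD_some,
        if_pos ⟨hxa, hyb.symm⟩]
    · rw [if_neg hyb, if_neg (fun hc => hyb hc.2.symm), ← List.getD_eq_getElem?_getD, hxa]
  · rw [if_neg hxa, if_neg (fun hc => hxa hc.1)]

lemma pvRun_head {g : Int → Bool} {o a : Int} (h : o ≤ a) :
    pvRun g o a = (g o && pvRun g (o + 1) a) := by
  unfold pvRun
  rw [PySem.List.pyRange_one_cons (by omega : o < a + 1)]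
  simp

lemma pvRun_self {g : Int → Bool} {a : Int} : pvRun g a a = g a := by
  unfold pvRun
  rw [PySem.List.pyRange_one_singleton]
  simp

lemma pvRun_last {g : Int → Bool} {o a : Int} (h : o ≤ a) :
    pvRun g o a = (pvRun g o (a - 1) && g a) := by
  unfold pvRun
  have h1 : a - 1 + 1 = a := by omega
  rw [show a + 1 = (a - 1 + 1) + 1 by omega, PySem.List.pyRange_one_succ_right (by omega), h1]
  simp

lemma pvRun_elem {g : Int → Bool} {o a x : Int} (h : pvRun g o a = true) (h1 : o ≤ x) (h2 : x ≤ a) :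
    g x = true := by
  unfold pvRun at h
  rw [List.all_eq_true] at h
  exact h x (PySem.List.mem_pyRange_one.mpr (by omega))

lemma pvF_bounds {p : List (List String)} {i j : Int} (h : pvF p i j = true) :
    0 ≤ i ∧ i < ↑p.length ∧ 0 ≤ j ∧ j < ↑p.length := by
  simp only [pvF, pvFilled, Bool.and_eq_true, decide_eq_true_eq] at h
  exact h.1

lemma pvShape_rowlen {α : Type} {g : List (List α)} {r c : Nat} (h : pvShape g r c) {x : Nat}
    (hx : x < r) : (g.getD x []).length = c := by
  rw [List.getD_eq_getElem g [] (by rw [h.1]; exact hx)]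
  exact h.2 _ (List.getElem_mem _)

lemma pvRow_getD {α : Type} (row : List α) {j : Int} (hj : 0 ≤ j) (d : α) :
    PySem.List.pyGetD row j d = row.getD j.toNat d := by
  show (PySem.List.pyGet? row j).getD d = _
  rw [PySem.List.pyGet?_of_nonneg _ hj, List.getD_eq_getElem?_getD]

-- the inner copy-in loop writes row i of planszatest
lemma pvAssign_inner (p : List (List String)) {i : Int} (hi : 0 ≤ i) :
    ∀ (l : List Int) (G : List (List String)) {R C : Nat}, pvShape G R C → i.toNat < R →
      (∀ x ∈ l, 0 ≤ x ∧ x.toNat < C) →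
      pvShape (l.foldl (fun pt j => pvSet2 pt i j (pvGet2D p i j "")) G) R C ∧
      ∀ (x y : Nat), x < R → y < C → ∀ d,
        pvG2 (l.foldl (fun pt j => pvSet2 pt i j (pvGet2D p i j "")) G) x y d =
          if x = i.toNat ∧ (↑y : Int) ∈ l then pvGet2D p i ↑y "" else pvG2 G x y d := by
  intro l
  induction l with
  | nil => exact fun G R C hG hiR hl => ⟨hG, fun x y hx hy d => by simp⟩
  | cons j t ih =>
    intro G R C hG hiR hl
    obtain ⟨hj0, hjC⟩ := hl j (List.mem_cons_self ..)
    rw [List.foldl_cons]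
    have hset : pvSet2 G i j (pvGet2D p i j "") =
        G.set i.toNat ((G.getD i.toNat []).set j.toNat (pvGet2D p i j "")) :=
      pvSet2_nonneg G hi hj0 _
    have hG' : pvShape (pvSet2 G i j (pvGet2D p i j "")) R C := by
      rw [hset]; exact pvShape_set hG hiR _ _
    obtain ⟨hsh, hread⟩ := ih _ hG' hiR (fun x hx => hl x (List.mem_cons_of_mem _ hx))
    refine ⟨hsh, fun x y hx hy d => ?_⟩
    rw [hread x y hx hy d, hset, pvG2_set hG hiR hjC]
    simp only [List.mem_cons]
    by_cases hxi : x = i.toNat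
    · by_cases hyt : (↑y : Int) ∈ t
      · rw [if_pos ⟨hxi, hyt⟩, if_pos ⟨hxi, Or.inr hyt⟩]
      · by_cases hyj : y = j.toNat
        · have hyjI : (↑y : Int) = j := by omega
          rw [if_neg (by tauto), if_pos ⟨hxi, hyj⟩, if_pos ⟨hxi, Or.inl hyjI⟩, hyjI]
        · have hyjI : ¬((↑y : Int) = j) := by omega
          rw [if_neg (by tauto), if_neg (by tauto), if_neg (by tauto)]
    · rw [if_neg (by tauto), if_neg (by tauto), if_neg (by tauto)]

-- the outer copy-in loop
lemma pvAssign_outer (p : List (List String)) :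
    ∀ (l : List Int) (G : List (List String)), pvShape G (p.length + 1) (p.length + 1) →
      (∀ x ∈ l, 0 ≤ x ∧ x < (↑p.length : Int)) →
      pvShape (l.foldl (fun pt i => (PySem.List.pyRange 0 (↑p.length) 1).foldl
        (fun pt j => pvSet2 pt i j (pvGet2D p i j "")) pt) G) (p.length + 1) (p.length + 1) ∧
      ∀ (x y : Nat), x < p.length + 1 → y < p.length + 1 → ∀ d,
        pvG2 (l.foldl (fun pt i => (PySem.List.pyRange 0 (↑p.length) 1).foldl
          (fun pt j => pvSet2 pt i j (pvGet2D p i j "")) pt) G) x y d =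
          if (↑x : Int) ∈ l ∧ y < p.length then pvGet2D p ↑x ↑y "" else pvG2 G x y d := by
  intro l
  induction l with
  | nil => exact fun G hG hl => ⟨hG, fun x y hx hy d => by simp⟩
  | cons i t ih =>
    intro G hG hl
    obtain ⟨hi0, hin⟩ := hl i (List.mem_cons_self ..)
    rw [List.foldl_cons]
    obtain ⟨hG', hread'⟩ := pvAssign_inner p hi0 (PySem.List.pyRange 0 (↑p.length) 1) G hG
      (by omega) (fun x hx => by
        obtain ⟨h1, h2⟩ := PySem.List.mem_pyRange_one.mp hx
        exact ⟨h1, by omega⟩)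
    obtain ⟨hsh, hread⟩ := ih _ hG' (fun x hx => hl x (List.mem_cons_of_mem _ hx))
    refine ⟨hsh, fun x y hx hy d => ?_⟩
    rw [hread x y hx hy d, hread' x y hx hy d]
    simp only [List.mem_cons]
    have hym : ((↑y : Int) ∈ PySem.List.pyRange 0 (↑p.length) 1) ↔ y < p.length := by
      rw [PySem.List.mem_pyRange_one]; omega
    have hxiIff : ((↑x : Int) = i) ↔ x = i.toNat := by omega
    by_cases hxt : (↑x : Int) ∈ t
    · by_cases hyn : y < p.length
      · rw [if_pos ⟨hxt, hyn⟩, if_pos ⟨Or.inr hxt, hyn⟩]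
      · rw [if_neg (by tauto), if_neg (by tauto), if_neg (by tauto)]
    · by_cases hxi : x = i.toNat
      · by_cases hyn : y < p.length
        · rw [if_neg (by tauto), if_pos ⟨hxi, hym.mpr hyn⟩, if_pos ⟨Or.inl (hxiIff.mpr hxi), hyn⟩,
            show i = (↑x : Int) from (hxiIff.mpr hxi).symm]
        · rw [if_neg (by tauto), if_neg (by rw [hym]; tauto), if_neg (by tauto)]
      · rw [if_neg (by tauto), if_neg (by tauto), if_neg (by rw [hxiIff]; tauto)]

-- the initial all-'-' grid
lemma pvPTinit_eq (p : List (List String)) :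
    ((PySem.List.pyRange 0 ((↑p.length : Int) + 1) 1).map
        (fun _ => (PySem.List.pyRange 0 ((↑p.length : Int) + 1) 1).map (fun _ => ("-" : String)))) =
      List.replicate (p.length + 1) (List.replicate (p.length + 1) "-") := by
  have hlen : (PySem.List.pyRange 0 ((↑p.length : Int) + 1) 1).length = p.length + 1 := by
    rw [PySem.List.length_pyRange_one]; omega
  rw [List.map_const', List.map_const', hlen]

lemma pvPT_unfold (p : List (List String)) : pvPlanszatest p =
    (PySem.List.pyRange 0 (↑p.length) 1).foldl (fun pt i =>
      (PySem.List.pyRange 0 (↑p.length) 1).foldl (fun pt j => pvSet2 pt i j (pvGet2D p i j "")) pt)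
      (List.replicate (p.length + 1) (List.replicate (p.length + 1) "-")) := by
  simp only [pvPlanszatest, PySem.List.len_eq, pvPTinit_eq]

-- shape and contents of planszatest
lemma pvPT_shape (p : List (List String)) :
    pvShape (pvPlanszatest p) (p.length + 1) (p.length + 1) := by
  rw [pvPT_unfold]
  exact (pvAssign_outer p _ _
    ⟨by simp, fun row hrow => by rw [List.eq_of_mem_replicate hrow]; simp⟩
    (fun x hx => PySem.List.mem_pyRange_one.mp hx)).1

-- a planszatest cell differs from '-' exactly on filled board cells (wraparound indices -1 read the padding)
lemma pvPT_read (p : List (List String)) {i j : Int}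
    (hi1 : -1 ≤ i) (hi2 : i ≤ ↑p.length) (hj1 : -1 ≤ j) (hj2 : j ≤ ↑p.length) :
    (pvGet2D (pvPlanszatest p) i j "" ≠ "-") ↔ pvF p i j = true := by
  have hshape := pvPT_shape p
  have hnat : ∀ (x y : Nat), x < p.length + 1 → y < p.length + 1 →
      pvG2 (pvPlanszatest p) x y "" =
        if x < p.length ∧ y < p.length then pvGet2D p ↑x ↑y "" else "-" := by
    intro x y hx hy
    rw [pvPT_unfold]
    rw [(pvAssign_outer p _ _
      ⟨by simp, fun row hrow => by rw [List.eq_of_mem_replicate hrow]; simp⟩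
      (fun z hz => PySem.List.mem_pyRange_one.mp hz)).2 x y hx hy ""]
    have hbase : pvG2 (List.replicate (p.length + 1) (List.replicate (p.length + 1) "-")) x y ""
        = "-" := by
      unfold pvG2
      rw [List.getD_replicate _ hx, List.getD_replicate _ hy]
    rw [hbase]
    by_cases h1 : x < p.length <;> by_cases h2 : y < p.length
    · rw [if_pos ⟨PySem.List.mem_pyRange_one.mpr (by omega), h2⟩, if_pos ⟨h1, h2⟩]
    · rw [if_neg (by tauto), if_neg (by tauto)]
    · rw [if_neg (by simp only [PySem.List.mem_pyRange_one]; omega), if_neg (by tauto)]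
    · rw [if_neg (by tauto), if_neg (by tauto)]
  rcases (by omega : i = -1 ∨ 0 ≤ i) with hi | hi
  · subst hi
    have hrow : (PySem.List.pyGet? (pvPlanszatest p) (-1)).getD [] =
        (pvPlanszatest p).getD p.length [] := by
      rw [PySem.List.pyGet?_neg_one, List.getLast?_eq_getElem?, hshape.1,
        List.getD_eq_getElem?_getD]
      simp
    have hval : pvGet2D (pvPlanszatest p) (-1) j "" = "-" := by
      show PySem.List.pyGetD ((PySem.List.pyGet? (pvPlanszatest p) (-1)).getD []) j "" = "-"
      rw [hrow]
      rcases (by omega : j = -1 ∨ 0 ≤ j) with hj | hj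
      · subst hj
        have hrl : ((pvPlanszatest p).getD p.length []).length = p.length + 1 :=
          pvShape_rowlen hshape (by omega)
        show (PySem.List.pyGet? ((pvPlanszatest p).getD p.length []) (-1)).getD "" = "-"
        rw [PySem.List.pyGet?_neg_one, List.getLast?_eq_getElem?, hrl]
        simp only [Nat.add_sub_cancel]
        rw [← List.getD_eq_getElem?_getD]
        have hv := hnat p.length p.length (by omega) (by omega)
        unfold pvG2 at hv
        rw [if_neg (by omega)] at hv
        exact hv
      · rw [pvRow_getD _ hj]
        have := hnat p.length j.toNat (by omega) (by omega)
        unfold pvG2 at this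
        rw [this]
        simp
    rw [hval]
    have : pvF p (-1) j = false := by simp [pvF, pvFilled]
    simp [this]
  · rcases (by omega : j = -1 ∨ 0 ≤ j) with hj | hj
    · subst hj
      have hval : pvGet2D (pvPlanszatest p) i (-1) "" = "-" := by
        show PySem.List.pyGetD ((PySem.List.pyGet? (pvPlanszatest p)  i).getD []) (-1) "" = "-"
        rw [PySem.List.pyGet?_of_nonneg _ hi]
        have hrow : (pvPlanszatest p)[i.toNat]?.getD [] = (pvPlanszatest p).getD i.toNat [] := by
          rw [List.getD_eq_getElem?_getD]
        rw [hrow]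
        have hrl : ((pvPlanszatest p).getD i.toNat []).length = p.length + 1 :=
          pvShape_rowlen hshape (by omega)
        show (PySem.List.pyGet? ((pvPlanszatest p).getD i.toNat []) (-1)).getD "" = "-"
        rw [PySem.List.pyGet?_neg_one, List.getLast?_eq_getElem?, hrl]
        simp only [Nat.add_sub_cancel]
        rw [← List.getD_eq_getElem?_getD]
        have hv := hnat i.toNat p.length (by omega) (by omega)
        unfold pvG2 at hv
        rw [if_neg (by omega)] at hv
        exact hv
      rw [hval]
      have : pvF p i (-1) = false := by simp [pvF, pvFilled]
      simp [this]
    · rw [pvGet2D_nonneg _ hi hj, hnat i.toNat j.toNat (by omega) (by omega)]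
      by_cases hin : i.toNat < p.length ∧ j.toNat < p.length
      · have hiI : (↑i.toNat : Int) = i := by omega
        have hjI : (↑j.toNat : Int) = j := by omega
        rw [if_pos hin, hiI, hjI]
        simp only [pvF, pvFilled]
        have hb : (0 ≤ i ∧ i < (↑p.length : Int) ∧ 0 ≤ j ∧ j < (↑p.length : Int)) := by omega
        simp [hb]
      · rw [if_neg hin]
        have : pvF p i j = false := by
          simp only [pvF, pvFilled]
          have : ¬(0 ≤ i ∧ i < (↑p.length : Int) ∧ 0 ≤ j ∧ j < (↑p.length : Int)) := by omega
          simp [this]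
        simp [this]

-- what the vertical while loop writes
lemma pvMarkV_char (p : List (List String)) (hpre : Pre_usunNieSlowa p) {j : Int}
    (hj : 0 ≤ j ∧ j < ↑p.length) :
    ∀ (fuel : Nat) (o : Int) (cz : List (List Int)), 0 ≤ o → o ≤ ↑p.length →
      ((↑p.length : Int) - o).toNat < fuel → pvShape cz 7 7 →
      pvShape (pvMarkV (pvPlanszatest p) (↑p.length) j fuel o cz) 7 7 ∧
      ∀ (a b : Nat), a < 7 → b < 7 →
        pvG2 (pvMarkV (pvPlanszatest p) (↑p.length) j fuel o cz) a b 0 =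
          if (↑b : Int) = j ∧ o ≤ (↑a : Int) ∧ pvRun (fun x => pvF p x j) o ↑a = true then 1
          else pvG2 cz a b 0 := by
  intro fuel
  induction fuel with
  | zero => intro o cz ho0 hon hfuel hcz; exact absurd hfuel (by omega)
  | succ fuel ih =>
    intro o cz ho0 hon hfuel hcz
    have hcond : (pvGet2D (pvPlanszatest p) o j "" ≠ "-" ∧ o < (↑p.length : Int)) ↔
        pvF p o j = true := by
      constructor
      · rintro ⟨h1, _⟩
        exact (pvPT_read p (by omega) (by omega) (by omega) (by omega)).mp h1
      · intro hF
        obtain ⟨b1, b2, b3, b4⟩ := pvF_bounds hF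
        exact ⟨(pvPT_read p (by omega) (by omega) (by omega) (by omega)).mpr hF, b2⟩
    simp only [pvMarkV]
    by_cases hF : pvF p o j = true
    · rw [if_pos (hcond.mpr hF)]
      have hb := pvF_bounds hF
      have ho7 : o.toNat < 7 := by have := hpre.1; omega
      have hj7 : j.toNat < 7 := by have := hpre.1; omega
      have hcz' : pvShape (pvSet2 cz o j 1) 7 7 := by
        rw [pvSet2_nonneg _ ho0 hj.1]
        exact pvShape_set hcz ho7 _ _
      obtain ⟨hsh, hread⟩ := ih (o + 1) _ (by omega) (by omega) (by omega) hcz'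
      refine ⟨hsh, fun a b ha hb7 => ?_⟩
      rw [hread a b ha hb7, pvSet2_nonneg _ ho0 hj.1, pvG2_set hcz ho7 hj7]
      by_cases hbj : (↑b : Int) = j
      · by_cases hoa : o ≤ (↑a : Int)
        · rcases eq_or_lt_of_le hoa with heq | hlt
          · rw [if_neg (by rintro ⟨_, h, _⟩; omega), if_pos ⟨by omega, by omega⟩,
              if_pos ⟨hbj, hoa, by rw [← heq, pvRun_self]; exact hF⟩]
          · have hrun : pvRun (fun x => pvF p x j) o ↑a = pvRun (fun x => pvF p x j) (o + 1) ↑a := by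
              rw [pvRun_head (by omega)]
              simp [hF]
            by_cases hr : pvRun (fun x => pvF p x j) (o + 1) ↑a = true
            · rw [if_pos ⟨hbj, by omega, hr⟩, if_pos ⟨hbj, hoa, by rw [hrun]; exact hr⟩]
            · rw [if_neg (by tauto), if_neg (by rintro ⟨_, h⟩; omega),
                if_neg (by rintro ⟨_, _, h3⟩; rw [hrun] at h3; exact hr h3)]
        · rw [if_neg (by rintro ⟨_, h, _⟩; omega), if_neg (by rintro ⟨h, _⟩; omega),
            if_neg (by rintro ⟨_, h, _⟩; omega)]
      · rw [if_neg (by tauto), if_neg (by rintro ⟨_, h2⟩; exact hbj (by omega)),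
          if_neg (by tauto)]
    · rw [if_neg (fun hc => hF (hcond.mp hc))]
      refine ⟨hcz, fun a b ha hb7 => ?_⟩
      rw [if_neg (by rintro ⟨_, h2, h3⟩; exact hF (pvRun_elem (g := fun x => pvF p x j) h3 (le_refl o) h2))]

-- what the horizontal while loop writes
lemma pvMarkH_char (p : List (List String)) (hpre : Pre_usunNieSlowa p) {i : Int}
    (hi : 0 ≤ i ∧ i < ↑p.length) :
    ∀ (fuel : Nat) (o : Int) (cz : List (List Int)), 0 ≤ o → o ≤ ↑p.length →
      ((↑p.length : Int) - o).toNat < fuel → pvShape cz 7 7 →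
      pvShape (pvMarkH (pvPlanszatest p) (↑p.length) i fuel o cz) 7 7 ∧
      ∀ (a b : Nat), a < 7 → b < 7 →
        pvG2 (pvMarkH (pvPlanszatest p) (↑p.length) i fuel o cz) a b 0 =
          if (↑a : Int) = i ∧ o ≤ (↑b : Int) ∧ pvRun (fun x => pvF p i x) o ↑b = true then 1
          else pvG2 cz a b 0 := by
  intro fuel
  induction fuel with
  | zero => intro o cz ho0 hon hfuel hcz; exact absurd hfuel (by omega)
  | succ fuel ih =>
    intro o cz ho0 hon hfuel hcz
    have hcond : (pvGet2D (pvPlanszatest p) i o "" ≠ "-" ∧ o < (↑p.length : Int)) ↔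
        pvF p i o = true := by
      constructor
      · rintro ⟨h1, _⟩
        exact (pvPT_read p (by omega) (by omega) (by omega) (by omega)).mp h1
      · intro hF
        obtain ⟨b1, b2, b3, b4⟩ := pvF_bounds hF
        exact ⟨(pvPT_read p (by omega) (by omega) (by omega) (by omega)).mpr hF, b4⟩
    simp only [pvMarkH]
    by_cases hF : pvF p i o = true
    · rw [if_pos (hcond.mpr hF)]
      have hb := pvF_bounds hF
      have ho7 : o.toNat < 7 := by have := hpre.1; omega
      have hi7 : i.toNat < 7 := by have := hpre.1; omega
      have hcz' : pvShape (pvSet2 cz i o 1) 7 7 := by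
        rw [pvSet2_nonneg _ hi.1 ho0]
        exact pvShape_set hcz hi7 _ _
      obtain ⟨hsh, hread⟩ := ih (o + 1) _ (by omega) (by omega) (by omega) hcz'
      refine ⟨hsh, fun a b ha hb7 => ?_⟩
      rw [hread a b ha hb7, pvSet2_nonneg _ hi.1 ho0, pvG2_set hcz hi7 ho7]
      by_cases hai : (↑a : Int) = i
      · by_cases hob : o ≤ (↑b : Int)
        · rcases eq_or_lt_of_le hob with heq | hlt
          · rw [if_neg (by rintro ⟨_, h, _⟩; omega), if_pos ⟨by omega, by omega⟩,
              if_pos ⟨hai, hob, by rw [← heq, pvRun_self]; exact hF⟩]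
          · have hrun : pvRun (fun x => pvF p i x) o ↑b = pvRun (fun x => pvF p i x) (o + 1) ↑b := by
              rw [pvRun_head (by omega)]
              simp [hF]
            by_cases hr : pvRun (fun x => pvF p i x) (o + 1) ↑b = true
            · rw [if_pos ⟨hai, by omega, hr⟩, if_pos ⟨hai, hob, by rw [hrun]; exact hr⟩]
            · rw [if_neg (by tauto), if_neg (by rintro ⟨_, h⟩; omega),
                if_neg (by rintro ⟨_, _, h3⟩; rw [hrun] at h3; exact hr h3)]
        · rw [if_neg (by rintro ⟨_, h, _⟩; omega), if_neg (by rintro ⟨_, h⟩; omega),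
            if_neg (by rintro ⟨_, h, _⟩; omega)]
      · rw [if_neg (by tauto), if_neg (by rintro ⟨h1, _⟩; exact hai (by omega)),
          if_neg (by tauto)]
    · rw [if_neg (fun hc => hF (hcond.mp hc))]
      refine ⟨hcz, fun a b ha hb7 => ?_⟩
      rw [if_neg (by rintro ⟨_, h2, h3⟩; exact hF (pvRun_elem (g := fun x => pvF p i x) h3 (le_refl o) h2))]

-- unfolding pvCzGrid
lemma pvCz_unfold (p : List (List String)) : pvCzGrid p =
    (PySem.List.pyRange 0 (↑p.length) 1).foldl (fun cz i =>
      (PySem.List.pyRange 0 (↑p.length) 1).foldl (fun cz j =>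
        if pvGet2D (pvPlanszatest p) i j "" ≠ "-" then
          if pvGet2D (pvPlanszatest p) i (j + 1) "" ≠ "-" ∧
              pvGet2D (pvPlanszatest p) i (j - 1) "" = "-" then
            pvMarkH (pvPlanszatest p) (↑p.length) i (p.length + 1) j
              (if pvGet2D (pvPlanszatest p) (i + 1) j "" ≠ "-" ∧
                  pvGet2D (pvPlanszatest p) (i - 1) j "" = "-" then
                pvMarkV (pvPlanszatest p) (↑p.length) j (p.length + 1) i cz else cz)
          else
            (if pvGet2D (pvPlanszatest p) (i + 1) j "" ≠ "-" ∧
                pvGet2D (pvPlanszatest p) (i - 1) j "" = "-" then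
              pvMarkV (pvPlanszatest p) (↑p.length) j (p.length + 1) i cz else cz)
        else cz) cz) pvCzInit := by
  simp only [pvCzGrid, PySem.List.len_eq, Int.toNat_natCast]

-- what one outer-loop body execution at (i0, j0) does to czescSlowa
set_option maxHeartbeats 2000000 in
lemma pvStep_char (p : List (List String)) (hpre : Pre_usunNieSlowa p) {i0 j0 : Int}
    (hi0 : 0 ≤ i0 ∧ i0 < ↑p.length) (hj0 : 0 ≤ j0 ∧ j0 < ↑p.length)
    (cz : List (List Int)) (hcz : pvShape cz 7 7) :
    pvShape (if pvGet2D (pvPlanszatest p) i0 j0 "" ≠ "-" then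
        if pvGet2D (pvPlanszatest p) i0 (j0 + 1) "" ≠ "-" ∧
            pvGet2D (pvPlanszatest p) i0 (j0 - 1) "" = "-" then
          pvMarkH (pvPlanszatest p) (↑p.length) i0 (p.length + 1) j0
            (if pvGet2D (pvPlanszatest p) (i0 + 1) j0 "" ≠ "-" ∧
                pvGet2D (pvPlanszatest p) (i0 - 1) j0 "" = "-" then
              pvMarkV (pvPlanszatest p) (↑p.length) j0 (p.length + 1) i0 cz else cz)
        else
          (if pvGet2D (pvPlanszatest p) (i0 + 1) j0 "" ≠ "-" ∧
              pvGet2D (pvPlanszatest p) (i0 - 1) j0 "" = "-" then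
            pvMarkV (pvPlanszatest p) (↑p.length) j0 (p.length + 1) i0 cz else cz)
      else cz) 7 7 ∧
    ∀ (a b : Nat), a < 7 → b < 7 →
      pvG2 (if pvGet2D (pvPlanszatest p) i0 j0 "" ≠ "-" then
          if pvGet2D (pvPlanszatest p) i0 (j0 + 1) "" ≠ "-" ∧
              pvGet2D (pvPlanszatest p) i0 (j0 - 1) "" = "-" then
            pvMarkH (pvPlanszatest p) (↑p.length) i0 (p.length + 1) j0
              (if pvGet2D (pvPlanszatest p) (i0 + 1) j0 "" ≠ "-" ∧
                  pvGet2D (pvPlanszatest p) (i0 - 1) j0 "" = "-" then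
                pvMarkV (pvPlanszatest p) (↑p.length) j0 (p.length + 1) i0 cz else cz)
          else
            (if pvGet2D (pvPlanszatest p) (i0 + 1) j0 "" ≠ "-" ∧
                pvGet2D (pvPlanszatest p) (i0 - 1) j0 "" = "-" then
              pvMarkV (pvPlanszatest p) (↑p.length) j0 (p.length + 1) i0 cz else cz)
        else cz) a b 0 =
        if (pvPV p ↑a ↑b i0 j0 || pvPH p ↑a ↑b i0 j0) = true then 1 else pvG2 cz a b 0 := by
  by_cases h0 : pvGet2D (pvPlanszatest p) i0 j0 "" ≠ "-"
  · have hF : pvF p i0 j0 = true :=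
      (pvPT_read p (by omega) (by omega) (by omega) (by omega)).mp h0
    rw [if_pos h0]
    -- the vertical piece
    have hvchar : pvShape (if pvGet2D (pvPlanszatest p) (i0 + 1) j0 "" ≠ "-" ∧
          pvGet2D (pvPlanszatest p) (i0 - 1) j0 "" = "-" then
        pvMarkV (pvPlanszatest p) (↑p.length) j0 (p.length + 1) i0 cz else cz) 7 7 ∧
        ∀ (a b : Nat), a < 7 → b < 7 →
          pvG2 (if pvGet2D (pvPlanszatest p) (i0 + 1) j0 "" ≠ "-" ∧
              pvGet2D (pvPlanszatest p) (i0 - 1) j0 "" = "-" then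
            pvMarkV (pvPlanszatest p) (↑p.length) j0 (p.length + 1) i0 cz else cz) a b 0 =
            if (pvF p (i0 + 1) j0 = true ∧ pvF p (i0 - 1) j0 = false) ∧
                ((↑b : Int) = j0 ∧ i0 ≤ (↑a : Int) ∧ pvRun (fun x => pvF p x j0) i0 ↑a = true)
              then 1 else pvG2 cz a b 0 := by
      by_cases hv : pvGet2D (pvPlanszatest p) (i0 + 1) j0 "" ≠ "-" ∧
          pvGet2D (pvPlanszatest p) (i0 - 1) j0 "" = "-"
      · have hv1 : pvF p (i0 + 1) j0 = true :=
          (pvPT_read p (by omega) (by omega) (by omega) (by omega)).mp hv.1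
        have hv2 : pvF p (i0 - 1) j0 = false := by
          have hiff := pvPT_read p (i := i0 - 1) (j := j0) (by omega) (by omega) (by omega) (by omega)
          rcases Bool.eq_false_or_eq_true (pvF p (i0 - 1) j0) with h | h
          · exact absurd (hiff.mpr h) (by rw [hv.2]; simp)
          · exact h
        rw [if_pos hv]
        obtain ⟨hsh, hrd⟩ := pvMarkV_char p hpre hj0 (p.length + 1) i0 cz hi0.1 (by omega)
          (by omega) hcz
        refine ⟨hsh, fun a b ha hb => ?_⟩
        rw [hrd a b ha hb]
        by_cases hc : (↑b : Int) = j0 ∧ i0 ≤ (↑a : Int) ∧ pvRun (fun x => pvF p x j0) i0 ↑a = true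
        · rw [if_pos hc, if_pos ⟨⟨hv1, hv2⟩, hc⟩]
        · rw [if_neg hc, if_neg (by tauto)]
      · rw [if_neg hv]
        refine ⟨hcz, fun a b ha hb => ?_⟩
        rw [if_neg (by
          rintro ⟨⟨h1, h2⟩, -⟩
          exact hv ⟨(pvPT_read p (by omega) (by omega) (by omega) (by omega)).mpr h1, by
            have hiff := pvPT_read p (i := i0 - 1) (j := j0) (by omega) (by omega) (by omega) (by omega)
            rcases eq_or_ne (pvGet2D (pvPlanszatest p) (i0 - 1) j0 "") "-" with he | hne
            · exact he
            · rw [hiff.mp hne] at h2; exact absurd h2 (by simp)⟩)]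
    obtain ⟨hshV, hrdV⟩ := hvchar
    by_cases hh : pvGet2D (pvPlanszatest p) i0 (j0 + 1) "" ≠ "-" ∧
        pvGet2D (pvPlanszatest p) i0 (j0 - 1) "" = "-"
    · have hh1 : pvF p i0 (j0 + 1) = true :=
        (pvPT_read p (by omega) (by omega) (by omega) (by omega)).mp hh.1
      have hh2 : pvF p i0 (j0 - 1) = false := by
        have hiff := pvPT_read p (i := i0) (j := j0 - 1) (by omega) (by omega) (by omega) (by omega)
        rcases Bool.eq_false_or_eq_true (pvF p i0 (j0 - 1)) with h | h
        · exact absurd (hiff.mpr h) (by rw [hh.2]; simp)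
        · exact h
      rw [if_pos hh]
      obtain ⟨hshH, hrdH⟩ := pvMarkH_char p hpre hi0 (p.length + 1) j0 _ hj0.1 (by omega)
        (by omega) hshV
      refine ⟨hshH, fun a b ha hb => ?_⟩
      rw [hrdH a b ha hb, hrdV a b ha hb]
      have hPV : (pvPV p ↑a ↑b i0 j0 = true) ↔
          ((pvF p (i0 + 1) j0 = true ∧ pvF p (i0 - 1) j0 = false) ∧
            ((↑b : Int) = j0 ∧ i0 ≤ (↑a : Int) ∧ pvRun (fun x => pvF p x j0) i0 ↑a = true)) := by
        simp only [pvPV, Bool.and_eq_true, decide_eq_true_eq, Bool.not_eq_true', hF,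
          and_true, and_assoc]
        tauto
      have hPH : (pvPH p ↑a ↑b i0 j0 = true) ↔
          ((↑a : Int) = i0 ∧ j0 ≤ (↑b : Int) ∧ pvRun (fun x => pvF p i0 x) j0 ↑b = true) := by
        simp only [pvPH, Bool.and_eq_true, decide_eq_true_eq, Bool.not_eq_true', hF, hh1, hh2,
          and_true, and_assoc]
        try tauto
      by_cases hCH : (↑a : Int) = i0 ∧ j0 ≤ (↑b : Int) ∧ pvRun (fun x => pvF p i0 x) j0 ↑b = true
      · rw [if_pos hCH, if_pos (by simp only [Bool.or_eq_true]; exact Or.inr (hPH.mpr hCH))]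
      · by_cases hCV : (pvF p (i0 + 1) j0 = true ∧ pvF p (i0 - 1) j0 = false) ∧
            ((↑b : Int) = j0 ∧ i0 ≤ (↑a : Int) ∧ pvRun (fun x => pvF p x j0) i0 ↑a = true)
        · rw [if_neg hCH, if_pos hCV, if_pos (by simp only [Bool.or_eq_true]; exact Or.inl (hPV.mpr hCV))]
        · rw [if_neg hCH, if_neg hCV, if_neg (by
            intro hc
            simp only [Bool.or_eq_true] at hc
            rcases hc with h | h
            · exact hCV (hPV.mp h)
            · exact hCH (hPH.mp h))]
    · rw [if_neg hh]
      refine ⟨hshV, fun a b ha hb => ?_⟩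
      rw [hrdV a b ha hb]
      have hPH : pvPH p ↑a ↑b i0 j0 = false := by
        rcases Bool.eq_false_or_eq_true (pvPH p ↑a ↑b i0 j0) with h | h
        · exfalso
          simp only [pvPH, Bool.and_eq_true, decide_eq_true_eq, Bool.not_eq_true'] at h
          refine hh ⟨(pvPT_read p (by omega) (by omega) (by omega) (by omega)).mpr h.1.1.1.2, ?_⟩
          have hiff := pvPT_read p (i := i0) (j := j0 - 1) (by omega) (by omega) (by omega) (by omega)
          rcases eq_or_ne (pvGet2D (pvPlanszatest p) i0 (j0 - 1) "") "-" with he | hne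
          · exact he
          · rw [hiff.mp hne] at h; simp at h
        · exact h
      have hPV : (pvPV p ↑a ↑b i0 j0 = true) ↔
          ((pvF p (i0 + 1) j0 = true ∧ pvF p (i0 - 1) j0 = false) ∧
            ((↑b : Int) = j0 ∧ i0 ≤ (↑a : Int) ∧ pvRun (fun x => pvF p x j0) i0 ↑a = true)) := by
        simp only [pvPV, Bool.and_eq_true, decide_eq_true_eq, Bool.not_eq_true', hF,
          and_true, and_assoc]
        tauto
      by_cases hCV : (pvF p (i0 + 1) j0 = true ∧ pvF p (i0 - 1) j0 = false) ∧
          ((↑b : Int) = j0 ∧ i0 ≤ (↑a : Int) ∧ pvRun (fun x => pvF p x j0) i0 ↑a = true)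
      · rw [if_pos hCV, if_pos (by simp only [Bool.or_eq_true]; exact Or.inl (hPV.mpr hCV))]
      · rw [if_neg hCV, if_neg (by
          intro hc
          simp only [Bool.or_eq_true] at hc
          rcases hc with h | h
          · exact hCV (hPV.mp h)
          · rw [hPH] at h; exact absurd h (by simp))]
  · rw [if_neg h0]
    have hFf : pvF p i0 j0 = false := by
      rcases Bool.eq_false_or_eq_true (pvF p i0 j0) with h | h
      · exact absurd ((pvPT_read p (by omega) (by omega) (by omega) (by omega)).mpr h) h0
      · exact h
    refine ⟨hcz, fun a b ha hb => ?_⟩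
    rw [if_neg (by simp [pvPV, pvPH, hFf])]

-- a fold of marking steps sets a cell to 1 exactly when some step marks it
lemma pvFold_mark {l : List Int} {step : List (List Int) → Int → List (List Int)}
    {P : Nat → Nat → Int → Bool}
    (hstep : ∀ cz x, x ∈ l → pvShape cz 7 7 → pvShape (step cz x) 7 7 ∧
      ∀ (a b : Nat), a < 7 → b < 7 →
        pvG2 (step cz x) a b 0 = if P a b x = true then 1 else pvG2 cz a b 0) :
    ∀ cz, pvShape cz 7 7 → pvShape (l.foldl step cz) 7 7 ∧
      ∀ (a b : Nat), a < 7 → b < 7 →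
        pvG2 (l.foldl step cz) a b 0 = if l.any (P a b) = true then 1 else pvG2 cz a b 0 := by
  induction l with
  | nil => exact fun cz hcz => ⟨hcz, fun a b ha hb => by simp⟩
  | cons x t ih =>
    intro cz hcz
    rw [List.foldl_cons]
    obtain ⟨hsh1, hrd1⟩ := hstep cz x (List.mem_cons_self ..) hcz
    obtain ⟨hsh, hrd⟩ := ih (fun cz y hy => hstep cz y (List.mem_cons_of_mem _ hy)) _ hsh1
    refine ⟨hsh, fun a b ha hb => ?_⟩
    rw [hrd a b ha hb, hrd1 a b ha hb]
    rw [show ((x :: t).any (P a b)) = (P a b x || t.any (P a b)) from List.any_cons]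
    by_cases h1 : t.any (P a b) = true
    · rw [if_pos h1, if_pos (by simp [h1])]
    · rw [if_neg h1]
      by_cases h2 : P a b x = true
      · rw [if_pos h2, if_pos (by simp [h2])]
      · rw [if_neg h2, if_neg (by simp [h1, h2])]

-- the final value of czescSlowa, cell by cell
set_option maxHeartbeats 1000000 in
lemma pvCz_char (p : List (List String)) (hpre : Pre_usunNieSlowa p) :
    pvShape (pvCzGrid p) 7 7 ∧
    ∀ (a b : Nat), a < 7 → b < 7 →
      pvG2 (pvCzGrid p) a b 0 =
        if ((PySem.List.pyRange 0 (↑p.length) 1).any (fun i0 => (PySem.List.pyRange 0 (↑p.length) 1).any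
            (fun j0 => pvPV p ↑a ↑b i0 j0 || pvPH p ↑a ↑b i0 j0))) = true then 1 else 0 := by
  rw [pvCz_unfold]
  have hinit : pvShape pvCzInit 7 7 := by
    refine ⟨rfl, ?_⟩
    intro row hrow
    fin_cases hrow <;> rfl
  have hbase : ∀ (a b : Nat), a < 7 → b < 7 → pvG2 pvCzInit a b 0 = 0 := by
    intro a b ha hb
    have : pvCzInit = List.replicate 7 (List.replicate 7 (0 : Int)) := by rfl
    rw [this]
    unfold pvG2
    rw [List.getD_replicate _ ha, List.getD_replicate _ hb]
  obtain ⟨hsh, hrd⟩ := pvFold_mark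
    (P := fun a b i0 => (PySem.List.pyRange 0 (↑p.length) 1).any
      (fun j0 => pvPV p ↑a ↑b i0 j0 || pvPH p ↑a ↑b i0 j0))
    (fun cz i0 hi0 hcz => by
      obtain ⟨hi01, hi02⟩ := PySem.List.mem_pyRange_one.mp hi0
      exact pvFold_mark (P := fun a b j0 => pvPV p ↑a ↑b i0 j0 || pvPH p ↑a ↑b i0 j0)
        (fun cz j0 hj0 hcz => by
          obtain ⟨hj01, hj02⟩ := PySem.List.mem_pyRange_one.mp hj0
          exact pvStep_char p hpre ⟨hi01, hi02⟩ ⟨hj01, hj02⟩ cz hcz) cz hcz)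
    pvCzInit hinit
  refine ⟨hsh, fun a b ha hb => ?_⟩
  rw [hrd a b ha hb, hbase a b ha hb]

-- B's keep mask, cell by cell
lemma pvKeep_read (p : List (List String)) {a b : Nat} (ha : a < p.length) (hb : b < p.length) :
    pvGet2D (pvKeep p) ↑a ↑b true =
      (pvF p ↑a ↑b && (pvF p (↑a + 1) ↑b || pvF p (↑a - 1) ↑b ||
        pvF p ↑a (↑b + 1) || pvF p ↑a (↑b - 1))) := by
  unfold pvGet2D
  simp only [pvKeep, PySem.List.len_eq]
  rw [PySem.List.pyGet?_natCast, PySem.List.getElem?_map_pyRange_zero _ p.length a ha]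
  simp only [Option.getD_some]
  rw [pvRow_getD _ (by omega : (0:Int) ≤ ↑b), Int.toNat_natCast, List.getD_eq_getElem?_getD,
    PySem.List.getElem?_map_pyRange_zero _ p.length b hb]
  simp only [Option.getD_some, pvF]

lemma pvDescend (g : Int → Bool) (hg : ∀ x, g x = true → 0 ≤ x) :
    ∀ (k : Nat) (a : Int), a ≤ ↑k → g a = true →
      ∃ s, 0 ≤ s ∧ s ≤ a ∧ g (s - 1) = false ∧ pvRun g s a = true := by
  intro k
  induction k with
  | zero =>
    intro a hk ha
    by_cases hprev : g (a - 1) = true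
    · exact absurd (hg _ hprev) (by have := hg _ ha; omega)
    · exact ⟨a, hg _ ha, le_refl a, (by simpa using hprev), by rw [pvRun_self]; exact ha⟩
  | succ k ih =>
    intro a hk ha
    by_cases hprev : g (a - 1) = true
    · have h1 : (0:Int) ≤ a - 1 := hg _ hprev
      obtain ⟨s, hs0, hs1, hs2, hs3⟩ := ih (a - 1) (by omega) hprev
      refine ⟨s, hs0, by omega, hs2, ?_⟩
      rw [pvRun_last (by omega)]
      simp [hs3, ha]
    · exact ⟨a, hg _ ha, le_refl a, (by simpa using hprev), by rw [pvRun_self]; exact ha⟩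

-- the 1-D core: a cell is covered by a marked run iff it has a filled neighbor on its line
lemma pvLine (g : Int → Bool) (n : Nat) (hg : ∀ x, g x = true → 0 ≤ x ∧ x < ↑n) {a : Int}
    (ha : g a = true) :
    (∃ s, (0 ≤ s ∧ s < (↑n : Int)) ∧ g s = true ∧ g (s + 1) = true ∧ g (s - 1) = false ∧
      s ≤ a ∧ pvRun g s a = true) ↔ (g (a + 1) = true ∨ g (a - 1) = true) := by
  constructor
  · rintro ⟨s, hsb, hgs, hgs1, hgsm, hsa, hrun⟩
    rcases eq_or_lt_of_le hsa with heq | hlt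
    · subst heq; exact Or.inl hgs1
    · exact Or.inr (pvRun_elem hrun (by omega) (by omega))
  · intro hnb
    by_cases hprev : g (a - 1) = true
    · have h0a : 0 ≤ a := (hg _ ha).1
      obtain ⟨s, hs0, hs1, hs2, hs3⟩ := pvDescend g (fun x hx => (hg x hx).1) a.toNat a (by omega) ha
      have hsne : s ≠ a := by rintro rfl; simp [hprev] at hs2
      have hgs : g s = true := pvRun_elem hs3 (le_refl s) (by omega)
      exact ⟨s, ⟨hs0, (hg _ hgs).2⟩, hgs, pvRun_elem hs3 (by omega) (by omega), hs2, by omega, hs3⟩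
    · refine ⟨a, ⟨(hg _ ha).1, (hg _ ha).2⟩, ha, ?_, (by simpa using hprev), le_refl a,
        by rw [pvRun_self]; exact ha⟩
      rcases hnb with h | h
      · exact h
      · exact absurd h hprev

-- A's mark condition coincides with B's neighbor condition
lemma pvCond_iff (p : List (List String)) {a b : Nat}
    (ha : a < p.length) (hb : b < p.length) :
    ((PySem.List.pyRange 0 (↑p.length) 1).any (fun i0 => (PySem.List.pyRange 0 (↑p.length) 1).any
        (fun j0 => pvPV p ↑a ↑b i0 j0 || pvPH p ↑a ↑b i0 j0))) =
      (pvF p ↑a ↑b && (pvF p (↑a + 1) ↑b || pvF p (↑a - 1) ↑b ||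
        pvF p ↑a (↑b + 1) || pvF p ↑a (↑b - 1))) := by
  rw [Bool.eq_iff_iff]
  simp only [List.any_eq_true, Bool.or_eq_true, PySem.List.mem_pyRange_one, pvPV, pvPH,
    Bool.and_eq_true, decide_eq_true_eq, Bool.not_eq_true', and_assoc]
  constructor
  · rintro ⟨i0, hi00, hi01, j0, hj00, hj01, hcase⟩
    rcases hcase with ⟨hbj, hF00, hFp, hFm, hia, hrun⟩ | ⟨hai, hF00, hFp, hFm, hjb, hrun⟩
    · subst hbj
      have hFab : pvF p ↑a ↑b = true :=
        pvRun_elem (g := fun x => pvF p x ↑b) hrun hia (le_refl _)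
      refine ⟨hFab, ?_⟩
      have hcol := pvLine (fun x => pvF p x ↑b) p.length
        (fun x hx => ⟨(pvF_bounds hx).1, (pvF_bounds hx).2.1⟩) (a := ↑a) hFab
      rcases hcol.mp ⟨i0, ⟨hi00, hi01⟩, hF00, hFp, hFm, hia, hrun⟩ with h | h
      · exact Or.inl (Or.inl (Or.inl h))
      · exact Or.inl (Or.inl (Or.inr h))
    · subst hai
      have hFab : pvF p ↑a ↑b = true :=
        pvRun_elem (g := fun x => pvF p ↑a x) hrun hjb (le_refl _)
      refine ⟨hFab, ?_⟩
      have hrow := pvLine (fun x => pvF p ↑a x) p.length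
        (fun x hx => ⟨(pvF_bounds hx).2.2.1, (pvF_bounds hx).2.2.2⟩) (a := ↑b) hFab
      rcases hrow.mp ⟨j0, ⟨hj00, hj01⟩, hF00, hFp, hFm, hjb, hrun⟩ with h | h
      · exact Or.inl (Or.inr h)
      · exact Or.inr h
  · rintro ⟨hFab, hnb⟩
    have hbb := pvF_bounds hFab
    have hcol := pvLine (fun x => pvF p x ↑b) p.length
      (fun x hx => ⟨(pvF_bounds hx).1, (pvF_bounds hx).2.1⟩) (a := ↑a) hFab
    have hrow := pvLine (fun x => pvF p ↑a x) p.length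
      (fun x hx => ⟨(pvF_bounds hx).2.2.1, (pvF_bounds hx).2.2.2⟩) (a := ↑b) hFab
    rcases hnb with ((h | h) | h) | h
    · obtain ⟨s, hsb, hgs, hgs1, hgsm, hsa, hrun⟩ := hcol.mpr (Or.inl h)
      exact ⟨s, hsb.1, hsb.2, ↑b, by omega, by omega, Or.inl ⟨rfl, hgs, hgs1, hgsm, hsa, hrun⟩⟩
    · obtain ⟨s, hsb, hgs, hgs1, hgsm, hsa, hrun⟩ := hcol.mpr (Or.inr h)
      exact ⟨s, hsb.1, hsb.2, ↑b, by omega, by omega, Or.inl ⟨rfl, hgs, hgs1, hgsm, hsa, hrun⟩⟩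
    · obtain ⟨s, hsb, hgs, hgs1, hgsm, hsa, hrun⟩ := hrow.mpr (Or.inl h)
      exact ⟨↑a, by omega, by omega, s, hsb.1, hsb.2, Or.inr ⟨rfl, hgs, hgs1, hgsm, hsa, hrun⟩⟩
    · obtain ⟨s, hsb, hgs, hgs1, hgsm, hsa, hrun⟩ := hrow.mpr (Or.inr h)
      exact ⟨↑a, by omega, by omega, s, hsb.1, hsb.2, Or.inr ⟨rfl, hgs, hgs1, hgsm, hsa, hrun⟩⟩

-- ===== VERDICT (by name: the statement is the Claim_ definition above) =====
theorem usunNieSlowa_spec : Claim_equal_usunNieSlowa := by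
  intro p hdom hpre
  show usunNieSlowa p = usunNieSlowa_alt p
  have hA : usunNieSlowa p = (PySem.List.pyRange 0 (↑p.length) 1).foldl (fun q i =>
      (PySem.List.pyRange 0 (↑p.length) 1).foldl (fun q j =>
        if pvGet2D (pvCzGrid p) i j 0 == 0 then pvSet2 q i j "-" else q) q) p := by
    simp only [usunNieSlowa, PySem.List.len_eq]
  have hB : usunNieSlowa_alt p = (PySem.List.pyRange 0 (↑p.length) 1).foldl (fun q i =>
      (PySem.List.pyRange 0 (↑p.length) 1).foldl (fun q j =>
        if !(pvGet2D (pvKeep p) i j true) then pvSet2 q i j "-" else q) q) p := by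
    simp only [usunNieSlowa_alt, PySem.List.len_eq]
  rw [hA, hB]
  apply PySem.List.foldl_congr_mem
  intro acc i hi
  apply PySem.List.foldl_congr_mem
  intro acc2 j hj
  obtain ⟨hi0, hi1⟩ := PySem.List.mem_pyRange_one.mp hi
  obtain ⟨hj0, hj1⟩ := PySem.List.mem_pyRange_one.mp hj
  have hiI : i = ((i.toNat : Nat) : Int) := by omega
  have hjI : j = ((j.toNat : Nat) : Int) := by omega
  have hcond : (pvGet2D (pvCzGrid p) i j 0 == 0) = !(pvGet2D (pvKeep p) i j true) := by
    rw [hiI, hjI]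
    rw [pvGet2D_nonneg _ (by omega) (by omega)]
    simp only [Int.toNat_natCast]
    rw [(pvCz_char p hpre).2 i.toNat j.toNat (by have := hpre.1; omega) (by have := hpre.1; omega)]
    rw [pvKeep_read p (a := i.toNat) (b := j.toNat) (by omega) (by omega)]
    rw [← pvCond_iff p (a := i.toNat) (b := j.toNat) (by omega) (by omega)]
    exact (by decide : ∀ (c : Bool), ((if c = true then (1 : Int) else 0) == 0) = !c) _
  rw [hcond]

set_option maxRecDepth 100000 in
theorem usunNieSlowa_raises : Claim_raises_usunNieSlowa := by
  unfold Claim_raises_usunNieSlowa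
  exact ⟨fun p _ hr hp => by have h1 := hr.1; have h2 := hp.1; omega, by decide⟩

-- witness self-check: the crash-fix witness really lies in the stated raise region
theorem usunNieSlowa_raises_witness_ok :
    Raises_usunNieSlowa pvRaiseWitness_usunNieSlowa := usunNieSlowa_raises.2.2.1
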